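-- pv_equiv track=rewrite | github.com/Namishna/DataQueryAI | app.py | _get_column_match
-- ===== SOURCE A (Python) =====
-- from typing import List, Tuple, Optional
--
-- def _get_column_match(question: str, columns: List[str]) -> Optional[str]:
--     """Find the best matching column for the question."""
--     question_lower = question.lower()
--
--     # Check exact match first
--     for col in columns:
--         if col.lower() in question_lower:
--             return col
--
--     # Check partial match using individual words
--     for col in columns:
--         for word in col.lower().split():
--             if word in question_lower:
--                 return col
--
--     return None
-- ===== SOURCE B (Python) =====
-- from typing import List, Optional
--
-- def _get_column_match(question: str, columns: List[str]) -> Optional[str]: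
--     """Single pass: full lowercase-substring match wins immediately; otherwise
--     remember the first column whose words hit, and return it after the scan."""
--     question_lower = question.lower()
--     word_match = None
--     for col in columns:
--         if col.lower() in question_lower:
--             return col
--         if word_match is None and any(word in question_lower for word in col.lower().split()):
--             word_match = col
--     return word_match
-- ===== Notes on version B (the rewrite author's own statement) =====
-- stated objective: simpler
-- what changed: Fused A's two passes over columns into one pass that returns a full substring match immediately and carries the first word-level match as a pending result returned after the scan.
import Mathlib
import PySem

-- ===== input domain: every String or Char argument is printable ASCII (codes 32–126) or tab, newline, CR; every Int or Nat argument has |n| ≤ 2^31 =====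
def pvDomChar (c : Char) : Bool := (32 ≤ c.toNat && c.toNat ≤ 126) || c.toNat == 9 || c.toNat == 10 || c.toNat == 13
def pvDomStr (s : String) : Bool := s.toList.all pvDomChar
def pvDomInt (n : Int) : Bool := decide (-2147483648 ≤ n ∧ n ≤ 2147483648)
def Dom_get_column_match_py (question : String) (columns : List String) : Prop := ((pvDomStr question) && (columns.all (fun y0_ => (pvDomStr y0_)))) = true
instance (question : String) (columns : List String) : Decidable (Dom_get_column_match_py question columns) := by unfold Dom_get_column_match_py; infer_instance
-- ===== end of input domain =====

-- B fuses A's two passes over columns into a single pass that returns a full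
-- substring match immediately and carries the first word-level match as a
-- pending result returned after the scan (objective: simpler).


-- ===== PORT A =====
-- 'for col in columns: if col.lower() in question_lower: return col' → List.find?
def get_column_match_py (question : String) (columns : List String) : Option String :=
  let question_lower := PySem.Str.lower question
  -- Check exact match first
  match columns.find? (fun col => PySem.Str.isIn (PySem.Str.lower col) question_lower) with
  | some col => some col
  | none =>
    -- Check partial match using individual words
    columns.find? (fun col =>
      (PySem.Str.split₀ (PySem.Str.lower col)).any (fun word => PySem.Str.isIn word question_lower))

-- ===== PORT B =====
-- single pass carrying the pending first word-match (mirrors Source B's loop)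
def gcmGo (ql : String) : List String → Option String → Option String
  | [], word_match => word_match
  | col :: rest, word_match =>
    if PySem.Str.isIn (PySem.Str.lower col) ql then some col
    else
      gcmGo ql rest
        (if word_match.isNone &&
            (PySem.Str.split₀ (PySem.Str.lower col)).any (fun word => PySem.Str.isIn word ql)
         then some col else word_match)

def get_column_match_py_alt (question : String) (columns : List String) : Option String :=
  gcmGo (PySem.Str.lower question) columns none

-- ===== PRECONDITION & SPEC =====
def Spec_get_column_match_py (question : String) (columns : List String) (out : Option String) : Prop := out = get_column_match_py_alt question columns
instance (question : String) (columns : List String) (out : Option String) : Decidable (Spec_get_column_match_py question columns out) := by unfold Spec_get_column_match_py; infer_instance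

-- ===== CLAIM (what is proved, stated in full; the proofs are below) =====
def Claim_equal_get_column_match_py : Prop := ∀ (question : String) (columns : List String), Dom_get_column_match_py question columns → Spec_get_column_match_py question columns (get_column_match_py question columns)

-- ===== LEMMAS AND PROOFS =====
lemma gcmGo_spec (ql : String) (cols : List String) (pending : Option String) :
    gcmGo ql cols pending =
      match cols.find? (fun col => PySem.Str.isIn (PySem.Str.lower col) ql) with
      | some col => some col
      | none =>
        match pending with
        | some p => some p
        | none => cols.find? (fun col =>
            (PySem.Str.split₀ (PySem.Str.lower col)).any (fun word => PySem.Str.isIn word ql)) := by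
  induction cols generalizing pending with
  | nil => cases pending <;> simp [gcmGo]
  | cons col rest ih =>
    simp only [gcmGo, List.find?]
    cases hfull : PySem.Str.isIn (PySem.Str.lower col) ql with
    | true => simp
    | false =>
      rw [ih]
      cases pending with
      | some p => simp
      | none =>
        cases hw : (PySem.Str.split₀ (PySem.Str.lower col)).any
            (fun word => PySem.Str.isIn word ql) <;> simp

-- ===== VERDICT (by name: the statement is the Claim_ definition above) =====
theorem get_column_match_py_spec : Claim_equal_get_column_match_py := by
  intro question columns _
  unfold Spec_get_column_match_py get_column_match_py get_column_match_py_alt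
  rw [gcmGo_spec]
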